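/- GENERATED by farm/mkstatement.py from design/units.tsv (unit `decode_residue.7b`) and the assertions of Vorbis/Spec/DecodeResidue7.lean — do not edit.
   THE STATEMENT of the proof unit `decode_residue.7b`: segment 7b of `decode_residue` (41 instructions; entries 0x10f36f;
   exits 0x10f40d; ranges 0x10f36f-0x10f409 + 0x10f4b9-0x10f4ce + 0x10f4d3-0x10f4e8)
   takes each of its entry assertions to one of its exit assertions (`Vorbis.Spec.DecodeResidue.Seg7b`), given the contracts of its callees.
   What the names mean: Vorbis/Spec/Basic.lean (the shared hypotheses), Vorbis/Spec/DecodeResidue7.lean (the assertions). The theorem to prove: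
   `theorem decode_residue_7b_ok : Vorbis.Spec.decode_residue_7b.Statement`. -/
import Vorbis.Spec.Codebook
import Vorbis.Spec.DecodeResidue7
namespace Vorbis.Spec.decode_residue_7b
open X86 X86.User Asan

/-- The statement of unit `decode_residue.7b`. -/
def Statement : Prop :=
  ∀ (Lay : Layout) (_hLay : Lay.hi = 0x1000000) (μ : Microarch) (_hμ : UserX.MicroOK μ) (u₀ : State)
    (_hcode : HasCodeNat Lay u₀ Vorbis.L.decode_residue.entry Vorbis.Code.code_decode_residue.nat Vorbis.L.decode_residue.size)
    (_h_asan_load8_noabort : Asan.SmallCheck Lay μ Vorbis.WayInv (Vorbis.CodeOK u₀) [.rax, .rcx, .rdx] 8 Vorbis.L.__asan_load8_noabort.entry)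
    (_h_asan_load1_noabort : Asan.SmallCheck Lay μ Vorbis.WayInv (Vorbis.CodeOK u₀) [.rax, .rdx] 1 Vorbis.L.__asan_load1_noabort.entry)
    (_h_asan_load4_noabort : Asan.SmallCheck Lay μ Vorbis.WayInv (Vorbis.CodeOK u₀) [.rax, .rcx, .rdx] 4 Vorbis.L.__asan_load4_noabort.entry)
    (_h_asan_load2_noabort : Asan.SmallCheck Lay μ Vorbis.WayInv (Vorbis.CodeOK u₀) [.rax, .rcx, .rdx] 2 Vorbis.L.__asan_load2_noabort.entry)
    (_h_codebook_decode_scalar_raw : ∀ (others : List Obj) (frames : List (Nat × FrameLayout)) (Blk : Block → Prop) (len : Nat), Calls Lay μ Vorbis.WayInv (Vorbis.conv u₀) Vorbis.L.codebook_decode_scalar_raw.entry (Vorbis.Spec.codebook_decode_scalar_raw.spec others frames Blk len)),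
    Vorbis.Spec.DecodeResidue.Seg7b Lay μ u₀

end Vorbis.Spec.decode_residue_7b
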